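-- pv_equiv track=rewrite | github.com/aradzie/napisy | main.py | parse_token_string
-- ===== SOURCE A (Python) =====
-- def parse_token_string(token_string, dictionary):
--   result = {token: False for token in dictionary}
--
--   if not token_string:
--     return result
--
--   for token in token_string.split(':'):
--     if token in dictionary:
--       result[token] = True
--
--   return result
-- ===== SOURCE B (Python) =====
-- def parse_token_string(token_string, dictionary):
--   if not token_string:
--     return {token: False for token in dictionary}
--   present = set(token_string.split(':'))
--   return {token: token in present for token in dictionary}
-- ===== Notes on version B (the rewrite author's own statement) =====
-- stated objective: simpler
-- what changed: Inverts the traversal: instead of seeding a dict with False and mutating it while scanning tokens with a list-membership test each, B builds a token set once and returns a single comprehension over the dictionary keys.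
import Mathlib
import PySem

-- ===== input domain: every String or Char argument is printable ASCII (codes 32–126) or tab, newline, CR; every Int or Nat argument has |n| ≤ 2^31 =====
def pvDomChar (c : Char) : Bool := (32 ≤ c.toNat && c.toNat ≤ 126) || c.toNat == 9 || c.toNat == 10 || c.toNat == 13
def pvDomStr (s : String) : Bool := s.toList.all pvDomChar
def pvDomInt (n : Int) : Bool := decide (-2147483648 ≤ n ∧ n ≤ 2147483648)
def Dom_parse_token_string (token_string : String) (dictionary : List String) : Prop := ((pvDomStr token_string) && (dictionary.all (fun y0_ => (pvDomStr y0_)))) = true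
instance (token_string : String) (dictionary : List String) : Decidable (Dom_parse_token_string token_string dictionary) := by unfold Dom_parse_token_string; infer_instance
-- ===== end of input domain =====

-- B inverts the traversal: a token set built once, then one pass over the dictionary keys (simpler; no inner list scan).

-- ===== PORT A =====
def parse_token_string (token_string : String) (dictionary : List String) : List (String × Bool) :=
  let result : PySem.Dict String Bool :=
    dictionary.foldl (fun d token => d.insert token false) PySem.Dict.empty
  if token_string = "" then result.items
  else
    (((PySem.Str.split? token_string ":").getD []).foldl
      (fun d token => if token ∈ dictionary then d.insert token true else d) result).items

-- ===== PORT B =====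
def parse_token_string_alt (token_string : String) (dictionary : List String) : List (String × Bool) :=
  if token_string = "" then
    (dictionary.foldl (fun d token => d.insert token false) PySem.Dict.empty).items
  else
    let present : PySem.Set String := PySem.Set.ofList ((PySem.Str.split? token_string ":").getD [])
    (dictionary.foldl (fun d token => d.insert token (decide (token ∈ present))) PySem.Dict.empty).items

-- ===== PRECONDITION & SPEC =====
def Spec_parse_token_string (token_string : String) (dictionary : List String) (out : List (String × Bool)) : Prop := out = parse_token_string_alt token_string dictionary
instance (token_string : String) (dictionary : List String) (out : List (String × Bool)) : Decidable (Spec_parse_token_string token_string dictionary out) := by unfold Spec_parse_token_string; infer_instance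

-- ===== CLAIM (what is proved, stated in full; the proofs are below) =====
def Claim_equal_parse_token_string : Prop := ∀ (token_string : String) (dictionary : List String), Dom_parse_token_string token_string dictionary → Spec_parse_token_string token_string dictionary (parse_token_string token_string dictionary)

-- ===== LEMMAS AND PROOFS =====

-- a fold of inserts whose value depends only on the key: lookup
theorem get?_foldl_insert_keyfn (c : String → Bool) (l : List String)
    (d : PySem.Dict String Bool) (k : String) :
    (l.foldl (fun d t => d.insert t (c t)) d).get? k
      = if k ∈ l then some (c k) else d.get? k := by
  induction l generalizing d with
  | nil => simp
  | cons t ts ih =>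
      simp only [List.foldl_cons, ih, PySem.Dict.get?_insert, List.mem_cons]
      by_cases hts : k ∈ ts
      · simp [hts]
      · by_cases hkt : k = t <;> simp [hkt, hts]

-- A's marking loop: lookup after the token loop
theorem get?_mark_loop (dict : List String) (ts : List String)
    (d : PySem.Dict String Bool) (k : String) :
    (ts.foldl (fun d t => if t ∈ dict then d.insert t true else d) d).get? k
      = if k ∈ ts ∧ k ∈ dict then some true else d.get? k := by
  induction ts generalizing d with
  | nil => simp
  | cons t ts ih =>
      simp only [List.foldl_cons, ih]
      by_cases htd : t ∈ dict
      · rw [if_pos htd, PySem.Dict.get?_insert]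
        by_cases hkt : k = t <;> by_cases hts : k ∈ ts <;>
          simp [hkt, hts, htd, List.mem_cons]
      · rw [if_neg htd]
        by_cases hkt : k = t <;> by_cases hts : k ∈ ts <;>
          simp [hkt, hts, htd, List.mem_cons]

-- A's marking loop keeps the key list when every dict member is already a key
theorem keys_mark_loop (dict : List String) (ts : List String)
    (d : PySem.Dict String Bool) (hd : ∀ t ∈ dict, d.contains t = true) :
    (ts.foldl (fun d t => if t ∈ dict then d.insert t true else d) d).keys = d.keys := by
  induction ts generalizing d with
  | nil => rfl
  | cons t ts ih =>
      simp only [List.foldl_cons]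
      by_cases htd : t ∈ dict
      · rw [if_pos htd]
        rw [ih _ (fun u hu => by
              rw [PySem.Dict.contains_insert]
              simp [hd u hu])]
        exact PySem.Dict.keys_insert_of_contains _ _ (hd t htd)
      · rw [if_neg htd]; exact ih d hd

theorem parse_token_string_spec : Claim_equal_parse_token_string := by
  intro ts dict _
  unfold Spec_parse_token_string parse_token_string parse_token_string_alt
  by_cases hts : ts = ""
  · simp [hts]
  · simp only [hts, if_neg, if_false]
    set toks := (PySem.Str.split? ts ":").getD [] with htoks
    set d0 : PySem.Dict String Bool :=
      dict.foldl (fun d token => d.insert token false) PySem.Dict.empty with hd0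
    have hkeys0 : d0.keys = PySem.Set.ofList dict := by
      rw [hd0]
      have := PySem.Dict.keys_foldl_insert dict (fun _ _ => false) PySem.Dict.empty
      simpa [PySem.Dict.keys_empty, PySem.Set.update_nil_left] using this
    have hget0 : ∀ k, d0.get? k = if k ∈ dict then some false else none := by
      intro k
      have := get?_foldl_insert_keyfn (fun _ => false) dict PySem.Dict.empty k
      simpa using this
    have hc0 : ∀ t ∈ dict, d0.contains t = true := by
      intro t ht
      rw [PySem.Dict.contains_eq_isSome_get?, hget0 t, if_pos ht]; rfl
    have hkeysA :
        ((toks.foldl (fun d token => if token ∈ dict then d.insert token true else d) d0).keys)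
          = PySem.Set.ofList dict := by
      rw [keys_mark_loop dict toks d0 hc0, hkeys0]
    have hkeysB :
        ((dict.foldl (fun d token =>
            d.insert token (decide (token ∈ PySem.Set.ofList toks))) PySem.Dict.empty).keys)
          = PySem.Set.ofList dict := by
      have := PySem.Dict.keys_foldl_insert dict
        (fun _ t => decide (t ∈ PySem.Set.ofList toks)) PySem.Dict.empty
      simpa [PySem.Dict.keys_empty, PySem.Set.update_nil_left] using this
    have hnd : (PySem.Set.ofList dict).Nodup := PySem.Set.nodup_ofList dict
    rw [PySem.Dict.items_eq_map_keys _ (by rw [hkeysA]; exact hnd) false,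
        PySem.Dict.items_eq_map_keys _ (by rw [hkeysB]; exact hnd) false,
        hkeysA, hkeysB]
    apply List.map_congr_left
    intro k hk
    have hkd : k ∈ dict := (PySem.Set.mem_ofList dict k).mp hk
    have hA := get?_mark_loop dict toks d0 k
    have hB := get?_foldl_insert_keyfn (fun t => decide (t ∈ PySem.Set.ofList toks))
      dict PySem.Dict.empty k
    simp only [PySem.Dict.getD_eq_get?_getD, hA, hB, hget0, if_pos hkd]
    by_cases hkt : k ∈ toks
    · simp [hkt, hkd, PySem.Set.mem_ofList]
    · simp [hkt, hkd, PySem.Set.mem_ofList]
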